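-- pv_equiv track=rewrite | github.com/trentw/script-to-speech | src/script_to_speech/utils/dialogue_stats_utils.py | get_speaker_statistics
-- ===== SOURCE A (Python) =====
-- from collections import Counter
-- from typing import Dict, List, NamedTuple, TypedDict
--
-- class SpeakerStats(NamedTuple):
--     """Statistics for a single speaker."""
--
--     line_count: int
--     total_characters: int
--     longest_dialogue: int
--
-- def analyze_speaker_lines(dialogues: List[Dict]) -> Dict[str, int]:
--     """
--     Analyze list of dialogue chunks to count speaker lines.
--     'default' speaker is used for chunks with no speaker attribute.
--     Returns counts with 'default' first, followed by other speakers sorted by frequency.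
--
--     Args:
--         dialogues: List of dialogue chunks
--
--     Returns:
--         Dict[str, int]: Ordered dict with speaker names as keys and line counts as values
--     """
--     counts: Counter[str] = Counter()
--     default_count = 0
--
--     for dialogue in dialogues:
--         if dialogue["type"] == "dialogue":
--             speaker = dialogue.get("speaker")
--             if speaker:
--                 counts[speaker] += 1
--             else:
--                 default_count += 1
--         else:
--             # Non-dialogue chunks use default speaker
--             default_count += 1
--
--     # Create ordered dict with default first
--     result = {"default": default_count}
--
--     # Add other speakers sorted by count (descending) then name
--     for speaker, count in sorted(counts.items(), key=lambda x: (-x[1], x[0])):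
--         result[speaker] = count
--
--     return result
--
-- def get_speaker_statistics(dialogues: List[Dict]) -> Dict[str, SpeakerStats]:
--     """
--     Get comprehensive statistics for all speakers in dialogue chunks.
--     Combines line counts and character statistics in a single pass for efficiency.
--
--     Args:
--         dialogues: List of dialogue chunks
--
--     Returns:
--         Dict[str, SpeakerStats]: Dictionary mapping speaker names to their statistics
--     """
--     # First get line counts using existing function
--     line_counts = analyze_speaker_lines(dialogues)
--
--     # Initialize character tracking for all speakers
--     char_counts = {speaker: 0 for speaker in line_counts}
--     max_dialogue_lengths = {speaker: 0 for speaker in line_counts}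
--
--     # Single pass through dialogues to calculate character stats
--     for dialogue in dialogues:
--         text = str(dialogue.get("text", ""))
--         text_length = len(text)
--         dialogue_speaker = dialogue.get("speaker")
--
--         # Determine which speaker this dialogue belongs to
--         if dialogue["type"] == "dialogue" and dialogue_speaker:
--             # Normal dialogue with speaker
--             target_speaker = dialogue_speaker
--         else:
--             # Non-dialogue chunks or dialogue without speaker go to default
--             target_speaker = "default"
--
--         # Update character count and max dialogue length for the target speaker
--         if target_speaker in char_counts:
--             char_counts[target_speaker] += text_length
--             max_dialogue_lengths[target_speaker] = max(
--                 max_dialogue_lengths[target_speaker], text_length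
--             )
--
--     # Combine all statistics
--     return {
--         speaker: SpeakerStats(
--             line_count=line_counts[speaker],
--             total_characters=char_counts[speaker],
--             longest_dialogue=max_dialogue_lengths[speaker],
--         )
--         for speaker in line_counts
--     }
-- ===== SOURCE B (Python) =====
-- from typing import Dict, List, NamedTuple
--
--
-- class SpeakerStats(NamedTuple):
--     """Statistics for a single speaker."""
--
--     line_count: int
--     total_characters: int
--     longest_dialogue: int
--
--
-- def get_speaker_statistics(dialogues: List[Dict]) -> Dict[str, SpeakerStats]:
--     """Single pass: accumulate one record per speaker, then order the output."""
--     stats = {"default": (0, 0, 0)}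
--     for dialogue in dialogues:
--         n = len(str(dialogue.get("text", "")))
--         speaker = dialogue.get("speaker")
--         key = speaker if dialogue["type"] == "dialogue" and speaker else "default"
--         lc, cc, ml = stats.get(key, (0, 0, 0))
--         stats[key] = (lc + 1, cc + n, max(ml, n))
--     default = stats.pop("default")
--     result = {"default": SpeakerStats(*default)}
--     for name, rec in sorted(stats.items(), key=lambda kv: (-kv[1][0], kv[0])):
--         result[name] = SpeakerStats(*rec)
--     return result
-- ===== Notes on version B (the rewrite author's own statement) =====
-- stated objective: simpler
-- what changed: B replaces A's two passes over the dialogues feeding a Counter plus three parallel per-speaker dicts with a single pass accumulating one dict speaker -> (line_count, total_characters, longest_dialogue), ordering the output ('default' first, rest by (-line_count, name)) afterwards.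
-- intended difference: On inputs that contain both an explicit speaker literally named 'default' and a chunk falling back to the default bucket, A reports for 'default' only the explicit-speaker line count (the fallback count is overwritten when the sorted counter is re-inserted over the seeded dict) while its character totals cover both; B reports the total line count of the 'default' bucket, consistent with the character totals, which is the intended value. — e.g. on get_speaker_statistics([[("type", "dialogue"), ("speaker", "default"), ("text", "ab")], [("type", "x")]]): A returns [("default", 1, 2, 2)], B returns [("default", 2, 2, 2)]
import Mathlib
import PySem

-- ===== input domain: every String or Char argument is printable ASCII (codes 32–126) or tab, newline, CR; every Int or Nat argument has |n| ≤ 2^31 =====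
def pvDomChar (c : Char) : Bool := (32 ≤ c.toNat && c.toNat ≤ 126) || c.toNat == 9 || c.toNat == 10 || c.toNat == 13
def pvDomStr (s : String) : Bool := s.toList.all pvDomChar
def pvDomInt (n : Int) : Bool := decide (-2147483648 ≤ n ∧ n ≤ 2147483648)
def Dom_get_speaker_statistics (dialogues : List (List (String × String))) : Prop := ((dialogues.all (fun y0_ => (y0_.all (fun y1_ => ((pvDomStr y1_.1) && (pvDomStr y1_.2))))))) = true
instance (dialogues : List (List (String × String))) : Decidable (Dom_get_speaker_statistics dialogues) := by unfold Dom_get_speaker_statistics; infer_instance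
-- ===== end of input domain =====

-- B replaces A's two passes over the dialogues feeding three parallel dicts with ONE pass into a single
-- dict speaker → (line_count, total_characters, longest_dialogue), ordering the output afterwards (simpler decomposition).

-- ===== PORT A =====

-- d.get(key) on a Python dict passed in as an association list (dict(...) keeps the LAST value of a duplicate key)
def pvLook (d : List (String × String)) (key : String) : Option String :=
  (PySem.Dict.ofList d).get? key

-- loop body of the counting loop in analyze_speaker_lines
def pvALinesStep (st : PySem.Dict String Int × Int) (d : List (String × String)) :
    PySem.Dict String Int × Int :=
  if (pvLook d "type").getD "" = "dialogue" then
    match pvLook d "speaker" with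
    | some speaker =>
        if speaker ≠ "" then (st.1.modify speaker 0 (· + 1), st.2) else (st.1, st.2 + 1)
    | none => (st.1, st.2 + 1)
  else (st.1, st.2 + 1)

def analyze_speaker_lines (dialogues : List (List (String × String))) : PySem.Dict String Int :=
  let st := dialogues.foldl pvALinesStep (PySem.Dict.empty, 0)
  let result := (PySem.Dict.empty : PySem.Dict String Int).insert "default" st.2
  (PySem.List.sorted2 st.1.items (fun x => -x.2) (fun x => x.1)).foldl
    (fun r p => r.insert p.1 p.2) result

-- target-speaker resolution: `speaker if dialogue["type"] == "dialogue" and dialogue_speaker else "default"`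
def pvTarget (d : List (String × String)) : String :=
  match pvLook d "speaker" with
  | some speaker =>
      if (pvLook d "type").getD "" = "dialogue" ∧ speaker ≠ "" then speaker else "default"
  | none => "default"

-- loop body of A's character-statistics pass
def pvCharStep (st : PySem.Dict String Int × PySem.Dict String Int) (d : List (String × String)) :
    PySem.Dict String Int × PySem.Dict String Int :=
  let text_length := PySem.Str.len ((pvLook d "text").getD "")
  let target := pvTarget d
  if st.1.contains target then
    (st.1.insert target (st.1.getD target 0 + text_length),
     st.2.insert target (max (st.2.getD target 0) text_length))
  else st

def get_speaker_statistics (dialogues : List (List (String × String))) :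
    List (String × Int × Int × Int) :=
  let line_counts := analyze_speaker_lines dialogues
  let char_counts0 := line_counts.keys.foldl (fun d k => d.insert k (0 : Int)) PySem.Dict.empty
  let max_lengths0 := line_counts.keys.foldl (fun d k => d.insert k (0 : Int)) PySem.Dict.empty
  let st := dialogues.foldl pvCharStep (char_counts0, max_lengths0)
  line_counts.keys.map (fun speaker =>
    (speaker, line_counts.getD speaker 0, st.1.getD speaker 0, st.2.getD speaker 0))

-- ===== PORT B =====

-- loop body of B's single accumulation pass
def pvStatsStep (st : PySem.Dict String (Int × Int × Int)) (d : List (String × String)) :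
    PySem.Dict String (Int × Int × Int) :=
  let n := PySem.Str.len ((pvLook d "text").getD "")
  let key := pvTarget d
  let r := st.getD key (0, 0, 0)
  st.insert key (r.1 + 1, r.2.1 + n, max r.2.2 n)

def get_speaker_statistics_alt (dialogues : List (List (String × String))) :
    List (String × Int × Int × Int) :=
  let stats := dialogues.foldl pvStatsStep
    ((PySem.Dict.empty : PySem.Dict String (Int × Int × Int)).insert "default" (0, 0, 0))
  let dft := stats.getD "default" (0, 0, 0)
  let rest := stats.erase "default"
  ("default", dft) :: PySem.List.sorted2 rest.items (fun kv => -kv.2.1) (fun kv => kv.1)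

-- ===== PRECONDITION & SPEC =====

-- Pre_ excludes exactly the chunks without a "type" key, on which the Python A (dialogue["type"]) raises KeyError.
def Pre_get_speaker_statistics (dialogues : List (List (String × String))) : Prop :=
  ∀ d ∈ dialogues, ((PySem.Dict.ofList d).get? "type").isSome = true
instance (dialogues : List (List (String × String))) : Decidable (Pre_get_speaker_statistics dialogues) := by
  unfold Pre_get_speaker_statistics; infer_instance

def pvWitness_get_speaker_statistics : (List (List (String × String))) :=
  [[("type", "dialogue"), ("speaker", "A"), ("text", "hi")]]

-- On inputs that contain both an explicit speaker named "default" and a chunk that falls back to the default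
-- bucket, A reports for "default" only the explicit-speaker line count (the fallback lines it counted are
-- overwritten when the sorted counter is re-inserted), while B reports the total number of lines in the
-- "default" bucket — consistent with the character totals both report for it, so B's value is the intended one.
def D_get_speaker_statistics (dialogues : List (List (String × String))) : Prop :=
  (∃ d ∈ dialogues, (PySem.Dict.ofList d).get? "type" = some "dialogue" ∧
      (PySem.Dict.ofList d).get? "speaker" = some "default") ∧
  (∃ d ∈ dialogues, ¬((PySem.Dict.ofList d).get? "type" = some "dialogue" ∧
      ((PySem.Dict.ofList d).get? "speaker").getD "" ≠ ""))
instance (dialogues : List (List (String × String))) : Decidable (D_get_speaker_statistics dialogues) := by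
  unfold D_get_speaker_statistics; infer_instance

def Spec_get_speaker_statistics (dialogues : List (List (String × String)))
    (out : List (String × Int × Int × Int)) : Prop :=
  ¬ D_get_speaker_statistics dialogues → out = get_speaker_statistics_alt dialogues
instance (dialogues : List (List (String × String))) (out : List (String × Int × Int × Int)) :
    Decidable (Spec_get_speaker_statistics dialogues out) := by
  unfold Spec_get_speaker_statistics; infer_instance

def pvDiffWitness_get_speaker_statistics : (List (List (String × String))) :=
  [[("type", "dialogue"), ("speaker", "default"), ("text", "ab")], [("type", "x")]]

def pvDiffWitnessOut_get_speaker_statistics :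
    (List (String × Int × Int × Int)) × (List (String × Int × Int × Int)) :=
  ([("default", 1, 2, 2)], [("default", 2, 2, 2)])

-- ===== CLAIM (what is proved, stated in full; the proofs are below) =====
def Claim_unchanged_get_speaker_statistics : Prop := ∀ (dialogues : List (List (String × String))), Dom_get_speaker_statistics dialogues → Pre_get_speaker_statistics dialogues → Spec_get_speaker_statistics dialogues (get_speaker_statistics dialogues)
def Claim_changed_get_speaker_statistics : Prop := Dom_get_speaker_statistics (pvDiffWitness_get_speaker_statistics) ∧ Pre_get_speaker_statistics (pvDiffWitness_get_speaker_statistics) ∧ D_get_speaker_statistics (pvDiffWitness_get_speaker_statistics) ∧ get_speaker_statistics (pvDiffWitness_get_speaker_statistics) = pvDiffWitnessOut_get_speaker_statistics.1 ∧ get_speaker_statistics_alt (pvDiffWitness_get_speaker_statistics) = pvDiffWitnessOut_get_speaker_statistics.2 ∧ pvDiffWitnessOut_get_speaker_statistics.1 ≠ pvDiffWitnessOut_get_speaker_statistics.2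

def Claim_exact_get_speaker_statistics : Prop := ∀ (dialogues : List (List (String × String))), Dom_get_speaker_statistics dialogues → Pre_get_speaker_statistics dialogues → D_get_speaker_statistics dialogues → get_speaker_statistics dialogues ≠ get_speaker_statistics_alt dialogues


-- ===== LEMMAS AND PROOFS =====

-- the explicit speaker of a chunk, when it has one
def pvSpk (d : List (String × String)) : Option String :=
  match pvLook d "speaker" with
  | some s => if (pvLook d "type").getD "" = "dialogue" ∧ s ≠ "" then some s else none
  | none => none

def pvLen (d : List (String × String)) : Int := PySem.Str.len ((pvLook d "text").getD "")

def pvChunks (ds : List (List (String × String))) (k : String) : List (List (String × String)) :=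
  ds.filter (fun d => pvTarget d == k)

def pvCC (ds : List (List (String × String))) (k : String) : Int := ((pvChunks ds k).map pvLen).sum
def pvML (ds : List (List (String × String))) (k : String) : Int :=
  ((pvChunks ds k).map pvLen).foldl max 0
def pvTrip (ds : List (List (String × String))) (k : String) : Int × Int × Int :=
  (((pvChunks ds k).length : Int), pvCC ds k, pvML ds k)

def pvS (ds : List (List (String × String))) : List String := ds.filterMap pvSpk
def pvDC (ds : List (List (String × String))) : Int :=
  ((ds.countP (fun d => (pvSpk d).isNone) : Nat) : Int)
def pvSortedC (ds : List (List (String × String))) : List (String × Int) :=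
  PySem.List.sorted2 (PySem.Dict.counter (pvS ds)).items (fun x => -x.2) (fun x => x.1)
def pvTail (ds : List (List (String × String))) : List (String × Int × Int × Int) :=
  ((pvSortedC ds).filter (fun p => decide (p.1 ∉ (["default"] : List String)))).map
    (fun p => (p.1, pvTrip ds p.1))
def pvHeadA (ds : List (List (String × String))) : Int :=
  if "default" ∈ pvS ds then (((pvS ds).count "default" : Nat) : Int) else pvDC ds

theorem pvTarget_eq_spk (d : List (String × String)) :
    pvTarget d = (pvSpk d).getD "default" := by
  unfold pvTarget pvSpk
  rcases h : pvLook d "speaker" with _ | s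
  · rfl
  · simp only []
    split_ifs <;> rfl

theorem getD_foldl_insert_of_not_mem (ps : List (String × Int)) (d : PySem.Dict String Int)
    (k : String) (h : k ∉ ps.map Prod.fst) :
    (ps.foldl (fun r p => r.insert p.1 p.2) d).getD k 0 = d.getD k 0 := by
  induction ps generalizing d with
  | nil => rfl
  | cons p ps ih =>
      simp only [List.map_cons, List.mem_cons, not_or] at h
      simp only [List.foldl_cons]
      rw [ih _ h.2, PySem.Dict.getD_insert, if_neg h.1]

theorem getD_foldl_insert_of_mem (ps : List (String × Int)) (d : PySem.Dict String Int)
    (k : String) (v : Int) (h : (k, v) ∈ ps) (hnd : (ps.map Prod.fst).Nodup) :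
    (ps.foldl (fun r p => r.insert p.1 p.2) d).getD k 0 = v := by
  induction ps generalizing d with
  | nil => cases h
  | cons p ps ih =>
      simp only [List.map_cons, List.nodup_cons] at hnd
      rcases List.mem_cons.mp h with h1 | h1
      · subst h1
        simp only [List.foldl_cons]
        rw [getD_foldl_insert_of_not_mem _ _ _ hnd.1, PySem.Dict.getD_insert, if_pos rfl]
      · simp only [List.foldl_cons]
        exact ih _ h1 hnd.2

theorem getD_foldl_insert_zero (l : List String) (d : PySem.Dict String Int)
    (h : ∀ k, d.getD k 0 = 0) (k : String) :
    (l.foldl (fun d k => d.insert k (0 : Int)) d).getD k 0 = 0 := by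
  induction l generalizing d with
  | nil => exact h k
  | cons x l ih =>
      simp only [List.foldl_cons]
      refine ih _ (fun k' => ?_)
      rw [PySem.Dict.getD_insert]
      split_ifs <;> simp [h]

theorem set_update_of_nodup (l : List String) (s : PySem.Set String) (hl : l.Nodup) :
    PySem.Set.update s l = s ++ l.filter (fun x => decide (x ∉ s)) := by
  induction l generalizing s with
  | nil => simp [PySem.Set.update]
  | cons x l ih =>
      simp only [List.nodup_cons] at hl
      show PySem.Set.update (s.add x) l = _
      by_cases hx : x ∈ s
      · rw [PySem.Set.add_of_mem hx, ih _ hl.2]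
        simp [hx]
      · rw [PySem.Set.add_of_not_mem hx, ih _ hl.2]
        have hf : List.filter (fun y => decide (y ∉ s ++ [x])) l
            = List.filter (fun y => decide (y ∉ s)) l := by
          apply List.filter_congr
          intro y hy
          have hyx : y ≠ x := fun e => hl.1 (e ▸ hy)
          simp [hyx]
        rw [hf]
        simp [hx]

theorem pvALinesStep_eq (st : PySem.Dict String Int × Int) (d : List (String × String)) :
    pvALinesStep st d =
      match pvSpk d with
      | some s => (st.1.modify s 0 (· + 1), st.2)
      | none => (st.1, st.2 + 1) := by
  unfold pvALinesStep pvSpk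
  rcases pvLook d "speaker" with _ | s
  · split_ifs <;> rfl
  · by_cases ht : (pvLook d "type").getD "" = "dialogue" <;>
      by_cases hs : s = "" <;> simp [ht, hs]

theorem analyze_fold (ds : List (List (String × String))) (c : PySem.Dict String Int) (n : Int) :
    ds.foldl pvALinesStep (c, n) =
      ((ds.filterMap pvSpk).foldl (fun d x => d.modify x 0 (fun v => v + 1)) c,
       n + ((ds.countP (fun d => (pvSpk d).isNone) : Nat) : Int)) := by
  induction ds generalizing c n with
  | nil => simp
  | cons d ds ih =>
      rw [List.foldl_cons, pvALinesStep_eq]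
      rcases h : pvSpk d with _ | s
      · simp only [List.filterMap_cons, h, List.countP_cons, Option.isNone_none, ih]
        refine Prod.ext rfl ?_
        show n + 1 + _ = n + _
        push_cast
        ring
      · simp only [List.filterMap_cons, h, List.countP_cons, Option.isNone_some, ih]
        simp

theorem char_fold (ds : List (List (String × String)))
    (cd md : PySem.Dict String Int) (k : String)
    (h : ∀ d ∈ ds, cd.contains (pvTarget d) = true) :
    (ds.foldl pvCharStep (cd, md)).1.getD k 0 = cd.getD k 0 + pvCC ds k ∧
    (ds.foldl pvCharStep (cd, md)).2.getD k 0 =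
      ((pvChunks ds k).map pvLen).foldl max (md.getD k 0) := by
  induction ds generalizing cd md with
  | nil => simp [pvCC, pvChunks]
  | cons d ds ih =>
      have hd := h d (List.mem_cons_self)
      rw [List.foldl_cons]
      have hstep : pvCharStep (cd, md) d =
          (cd.insert (pvTarget d) (cd.getD (pvTarget d) 0 + pvLen d),
           md.insert (pvTarget d) (max (md.getD (pvTarget d) 0) (pvLen d))) := by
        simp [pvCharStep, hd, pvLen]
      rw [hstep]
      have hcont : ∀ e ∈ ds,
          (cd.insert (pvTarget d) (cd.getD (pvTarget d) 0 + pvLen d)).contains (pvTarget e) = true := by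
        intro e he
        rw [PySem.Dict.contains_insert, h e (List.mem_cons_of_mem _ he)]
        simp
      have := ih _ (md.insert (pvTarget d) (max (md.getD (pvTarget d) 0) (pvLen d))) hcont
      rcases this with ⟨h1, h2⟩
      by_cases hk : pvTarget d = k
      · subst hk
        refine ⟨?_, ?_⟩
        · rw [h1, PySem.Dict.getD_insert, if_pos rfl]
          simp only [pvCC, pvChunks, List.filter_cons, beq_self_eq_true, if_pos, List.map_cons,
            List.sum_cons]
          ring
        · rw [h2, PySem.Dict.getD_insert, if_pos rfl]
          simp [pvChunks]
      · refine ⟨?_, ?_⟩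
        · rw [h1, PySem.Dict.getD_insert, if_neg (fun e => hk e.symm)]
          simp only [pvCC, pvChunks, List.filter_cons]
          have : (pvTarget d == k) = false := by simp [hk]
          rw [this]
          simp
        · rw [h2, PySem.Dict.getD_insert, if_neg (fun e => hk e.symm)]
          simp only [pvChunks, List.filter_cons]
          have : (pvTarget d == k) = false := by simp [hk]
          rw [this]
          simp

theorem stats_fold (ds : List (List (String × String)))
    (st : PySem.Dict String (Int × Int × Int)) (k : String) :
    (ds.foldl pvStatsStep st).getD k (0, 0, 0) =
      ((st.getD k (0, 0, 0)).1 + ((pvChunks ds k).length : Int),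
       (st.getD k (0, 0, 0)).2.1 + pvCC ds k,
       ((pvChunks ds k).map pvLen).foldl max (st.getD k (0, 0, 0)).2.2) := by
  induction ds generalizing st with
  | nil => simp [pvCC, pvChunks]
  | cons d ds ih =>
      rw [List.foldl_cons]
      have hstep : pvStatsStep st d =
          st.insert (pvTarget d)
            ((st.getD (pvTarget d) (0,0,0)).1 + 1,
             (st.getD (pvTarget d) (0,0,0)).2.1 + pvLen d,
             max (st.getD (pvTarget d) (0,0,0)).2.2 (pvLen d)) := rfl
      rw [hstep, ih]
      by_cases hk : pvTarget d = k
      · subst hk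
        rw [PySem.Dict.getD_insert, if_pos rfl]
        simp only [pvCC, pvChunks, List.filter_cons, beq_self_eq_true, if_pos, List.map_cons,
          List.sum_cons, List.length_cons, List.foldl_cons]
        refine Prod.ext (by push_cast; ring) (Prod.ext (by ring) rfl)
      · rw [PySem.Dict.getD_insert, if_neg (fun e => hk e.symm)]
        have : (pvTarget d == k) = false := by simp [hk]
        simp only [pvCC, pvChunks, List.filter_cons, this]
        simp

theorem count_target_default (ds : List (List (String × String))) :
    ((pvChunks ds "default").length : Int) =
      ((ds.countP (fun d => (pvSpk d).isNone) : Nat) : Int) +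
      (((ds.filterMap pvSpk).count "default" : Nat) : Int) := by
  induction ds with
  | nil => simp [pvChunks]
  | cons d ds ih =>
      have ht : pvTarget d = (pvSpk d).getD "default" := by
        unfold pvTarget pvSpk
        rcases pvLook d "speaker" with _ | s
        · rfl
        · simp only []
          split_ifs <;> rfl
      simp only [pvChunks] at ih
      simp only [pvChunks, List.filter_cons, List.countP_cons, List.filterMap_cons]
      rcases h : pvSpk d with _ | s
      · rw [h] at ht
        simp only [Option.getD_none] at ht
        simp only [ht, beq_self_eq_true, if_true, List.length_cons, Option.isNone_none]
        push_cast
        omega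
      · rw [h] at ht
        simp only [Option.getD_some] at ht
        simp only [ht, Option.isNone_some, List.count_cons]
        by_cases hs : s = "default" <;>
          [skip; skip] <;> first
          | (simp only [hs, beq_self_eq_true, if_true, List.length_cons]; push_cast; omega)
          | (have h1 : (s == "default") = false := by simp [hs]
             simp only [h1, Bool.false_eq_true, if_false]
             push_cast
             omega)

theorem count_target_of_ne (ds : List (List (String × String))) (k : String) (hk : k ≠ "default") :
    ((pvChunks ds k).length : Int) = (((ds.filterMap pvSpk).count k : Nat) : Int) := by
  induction ds with
  | nil => simp [pvChunks]
  | cons d ds ih =>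
      have ht : pvTarget d = (pvSpk d).getD "default" := by
        unfold pvTarget pvSpk
        rcases pvLook d "speaker" with _ | s
        · rfl
        · simp only []
          split_ifs <;> rfl
      simp only [pvChunks] at ih
      simp only [pvChunks, List.filter_cons, List.filterMap_cons]
      rcases h : pvSpk d with _ | s
      · rw [h] at ht
        simp only [Option.getD_none] at ht
        have hne : (pvTarget d == k) = false := by
          simp only [ht, beq_eq_false_iff_ne, ne_eq]
          exact fun e => hk e.symm
        simp only [hne, Bool.false_eq_true, if_false]
        exact ih
      · rw [h] at ht
        simp only [Option.getD_some] at ht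
        simp only [ht, List.count_cons]
        by_cases hs : s = k
        · simp only [hs, beq_self_eq_true, if_true, List.length_cons]
          push_cast
          omega
        · have h1 : (s == k) = false := by simp [hs]
          simp only [h1, Bool.false_eq_true, if_false]
          push_cast
          omega

theorem sorted2_eq_sorted_lex {α : Type} (xs : List α) (k1 : α → Int) (k2 : α → String) :
    PySem.List.sorted2 xs k1 k2 = PySem.List.sorted xs (fun x => toLex (k1 x, k2 x)) := by
  have hcmp : (fun a b => decide (k1 a < k1 b) || (!decide (k1 b < k1 a) && decide (k2 a < k2 b)))
      = (fun a b => decide (toLex (k1 a, k2 a) < toLex (k1 b, k2 b))) := by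
    funext a b
    rw [Bool.eq_iff_iff]
    simp only [Bool.or_eq_true, Bool.and_eq_true, Bool.not_eq_true', decide_eq_true_eq,
      decide_eq_false_iff_not, Prod.Lex.lt_iff, ofLex_toLex]
    constructor
    · rintro (h | ⟨h1, h2⟩)
      · exact Or.inl h
      · rcases lt_trichotomy (k1 a) (k1 b) with h3 | h3 | h3
        · exact Or.inl h3
        · exact Or.inr ⟨h3, h2⟩
        · exact absurd h3 h1
    · rintro (h | ⟨h1, h2⟩)
      · exact Or.inl h
      · exact Or.inr ⟨by rw [h1]; exact lt_irrefl _, h2⟩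
  unfold PySem.List.sorted2 PySem.List.sorted
  simp only [Bool.false_eq_true, if_false, hcmp]

theorem mem_target_iff (ds : List (List (String × String))) (k : String) (hk : k ≠ "default") :
    k ∈ ds.map pvTarget ↔ k ∈ pvS ds := by
  simp only [List.mem_map, pvS, List.mem_filterMap]
  constructor
  · rintro ⟨d, hd, hval⟩
    refine ⟨d, hd, ?_⟩
    rw [pvTarget_eq_spk] at hval
    rcases h : pvSpk d with _ | s
    · rw [h] at hval; exact absurd hval.symm hk
    · rw [h] at hval
      simp only [Option.getD_some] at hval
      rw [hval]
  · rintro ⟨d, hd, hval⟩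
    exact ⟨d, hd, by rw [pvTarget_eq_spk, hval]; rfl⟩

theorem sortedC_fst_perm (ds : List (List (String × String))) :
    ((pvSortedC ds).map Prod.fst).Perm (PySem.Set.ofList (pvS ds)) := by
  have h1 := (PySem.List.sorted2_perm (PySem.Dict.counter (pvS ds)).items
    (fun x : String × Int => -x.2) (fun x : String × Int => x.1) false).map Prod.fst
  have h2 : (PySem.Dict.counter (pvS ds)).items.map Prod.fst = PySem.Set.ofList (pvS ds) := by
    rw [PySem.Dict.items_counter, List.map_map]
    have : (Prod.fst ∘ fun k : String => (k, ((pvS ds).count k : Int))) = id := rfl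
    rw [this, List.map_id]
  unfold pvSortedC
  rw [← h2]
  exact h1

theorem sortedC_fst_nodup (ds : List (List (String × String))) :
    ((pvSortedC ds).map Prod.fst).Nodup := by
  rw [List.Perm.nodup_iff (sortedC_fst_perm ds)]
  exact PySem.Set.nodup_ofList _

theorem mem_sortedC (ds : List (List (String × String))) (p : String × Int) :
    p ∈ pvSortedC ds ↔ p ∈ (PySem.Dict.counter (pvS ds)).items :=
  (PySem.List.sorted2_perm _ _ _ _).mem_iff

theorem tail_eq_map_keys (ds : List (List (String × String))) :
    pvTail ds = (((pvSortedC ds).map Prod.fst).filter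
        (fun x => decide (x ∉ (["default"] : List String)))).map
      (fun k => (k, pvTrip ds k)) := by
  unfold pvTail
  rw [List.filter_map, List.map_map]
  rfl

theorem mem_tail_keys (ds : List (List (String × String))) (x : String) :
    x ∈ ((pvSortedC ds).map Prod.fst).filter
        (fun x => decide (x ∉ (["default"] : List String))) ↔
      x ≠ "default" ∧ x ∈ pvS ds := by
  rw [List.mem_filter, (sortedC_fst_perm ds).mem_iff, PySem.Set.mem_ofList]
  simp [and_comm]

theorem tail_perm (ds : List (List (String × String))) (K : List String) (hnd : K.Nodup)
    (hmem : ∀ x, x ∈ K ↔ (x ≠ "default" ∧ x ∈ pvS ds)) :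
    (pvTail ds).Perm (K.map (fun k => (k, pvTrip ds k))) := by
  rw [tail_eq_map_keys]
  refine List.Perm.map _ ?_
  rw [List.perm_ext_iff_of_nodup ((sortedC_fst_nodup ds).filter _) hnd]
  intro a
  rw [mem_tail_keys, hmem]

theorem tail_pairwise (ds : List (List (String × String))) :
    (pvTail ds).Pairwise
      (fun a b => toLex (-a.2.1, a.1) < toLex (-b.2.1, b.1)) := by
  have hb := sorted2_eq_sorted_lex (PySem.Dict.counter (pvS ds)).items
    (fun x : String × Int => -x.2) (fun x : String × Int => x.1)
  have hpw : (pvSortedC ds).Pairwise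
      (fun a b => toLex (-a.2, a.1) ≤ toLex (-b.2, b.1)) := by
    unfold pvSortedC
    rw [hb]
    exact PySem.List.sorted_pairwise _ _
  have hne : (pvSortedC ds).Pairwise (fun a b => a.1 ≠ b.1) :=
    List.pairwise_map.mp (sortedC_fst_nodup ds)
  have hlt : (pvSortedC ds).Pairwise
      (fun a b => toLex (-a.2, a.1) < toLex (-b.2, b.1)) := by
    refine (hpw.and hne).imp ?_
    rintro a b ⟨hle, hne'⟩
    refine lt_of_le_of_ne hle (fun he => hne' ?_)
    rw [toLex_inj, Prod.ext_iff] at he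
    exact he.2
  have hfl : ((pvSortedC ds).filter (fun p => decide (p.1 ∉ (["default"] : List String)))).Pairwise
      (fun a b => toLex (-a.2, a.1) < toLex (-b.2, b.1)) :=
    List.Pairwise.sublist List.filter_sublist hlt
  unfold pvTail
  rw [List.pairwise_map]
  refine hfl.imp_of_mem ?_
  intro a b ha hb' hab
  have hmem : ∀ p : String × Int,
      p ∈ (pvSortedC ds).filter (fun p => decide (p.1 ∉ (["default"] : List String))) →
      (pvTrip ds p.1).1 = p.2 := by
    intro p hp
    rcases List.mem_filter.mp hp with ⟨hp1, hp2⟩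
    have hp3 := (mem_sortedC ds p).mp hp1
    rw [PySem.Dict.items_counter] at hp3
    rcases List.mem_map.mp hp3 with ⟨k, _, hk2⟩
    have hkp : p.1 = k := by rw [← hk2]
    have hval : p.2 = ((pvS ds).count k : Int) := by rw [← hk2]
    have hne' : p.1 ≠ "default" := by simpa using hp2
    have hc := count_target_of_ne ds k (hkp ▸ hne')
    simp only [pvTrip, hkp, hval, pvS]
    exact hc
  rw [show (pvTrip ds a.1).1 = a.2 from hmem a ha, show (pvTrip ds b.1).1 = b.2 from hmem b hb']
  exact hab

theorem B_out (ds : List (List (String × String))) :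
    get_speaker_statistics_alt ds = ("default", pvTrip ds "default") :: pvTail ds := by
  unfold get_speaker_statistics_alt
  have hstep : pvStatsStep = fun (st : PySem.Dict String (Int × Int × Int)) d =>
      st.insert (pvTarget d)
        ((st.getD (pvTarget d) (0, 0, 0)).1 + 1,
         (st.getD (pvTarget d) (0, 0, 0)).2.1 + PySem.Str.len ((pvLook d "text").getD ""),
         max (st.getD (pvTarget d) (0, 0, 0)).2.2 (PySem.Str.len ((pvLook d "text").getD ""))) := rfl
  set seed := ((PySem.Dict.empty : PySem.Dict String (Int × Int × Int)).insert "default" (0, 0, 0))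
    with hseeddef
  have hseed : ∀ k, seed.getD k (0, 0, 0) = (0, 0, 0) := by
    intro k
    rw [hseeddef, PySem.Dict.getD_insert]
    split_ifs <;> simp
  have hgetD : ∀ k, (ds.foldl pvStatsStep seed).getD k (0, 0, 0) = pvTrip ds k := by
    intro k
    rw [stats_fold, hseed]
    simp [pvTrip, pvML]
  have hkeys : (ds.foldl pvStatsStep seed).keys = PySem.Set.update ["default"] (ds.map pvTarget) := by
    rw [hstep, PySem.Dict.keys_foldl_insert_key]
    rfl
  have hknd : (ds.foldl pvStatsStep seed).keys.Nodup := by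
    rw [hstep]
    refine PySem.Dict.nodup_keys_foldl_insert_key _ _ _ _ ?_
    have h0 : seed.keys = ["default"] := rfl
    rw [h0]
    simp
  have hitems : (ds.foldl pvStatsStep seed).items =
      (ds.foldl pvStatsStep seed).keys.map (fun k => (k, pvTrip ds k)) := by
    rw [PySem.Dict.items_eq_map_keys _ hknd (0, 0, 0)]
    exact List.map_congr_left (fun k _ => by rw [hgetD])
  have hrest : ((ds.foldl pvStatsStep seed).erase "default").items =
      (((ds.foldl pvStatsStep seed).keys.filter (fun k => !(k == "default"))).map
        (fun k => (k, pvTrip ds k))) := by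
    show ((ds.foldl pvStatsStep seed).items.filter (fun p => !(p.1 == "default"))) = _
    rw [hitems, List.filter_map]
    rfl
  have hKnd : ((ds.foldl pvStatsStep seed).keys.filter (fun k => !(k == "default"))).Nodup :=
    hknd.filter _
  have hKmem : ∀ x, x ∈ (ds.foldl pvStatsStep seed).keys.filter (fun k => !(k == "default")) ↔
      (x ≠ "default" ∧ x ∈ pvS ds) := by
    intro x
    rw [List.mem_filter, hkeys, PySem.Set.mem_update]
    constructor
    · rintro ⟨hmem, hne⟩
      have hx : x ≠ "default" := by simpa using hne
      rcases hmem with hmem | hmem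
      · simp at hmem; exact absurd hmem hx
      · exact ⟨hx, (mem_target_iff ds x hx).mp hmem⟩
    · rintro ⟨hx, hmem⟩
      exact ⟨Or.inr ((mem_target_iff ds x hx).mpr hmem), by simpa using hx⟩
  have hsorted : PySem.List.sorted2
      (((ds.foldl pvStatsStep seed).erase "default").items)
      (fun kv => -kv.2.1) (fun kv => kv.1) = pvTail ds := by
    rw [hrest, sorted2_eq_sorted_lex]
    refine PySem.List.sorted_eq_of_perm_of_pairwise_lt _ _ _ ?_ ?_
    · exact tail_perm ds _ hKnd hKmem
    · exact tail_pairwise ds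
  simp only []
  rw [hgetD, hsorted]

theorem analyze_eq (ds : List (List (String × String))) :
    analyze_speaker_lines ds =
      (pvSortedC ds).foldl (fun r p => r.insert p.1 p.2)
        ((PySem.Dict.empty : PySem.Dict String Int).insert "default" (pvDC ds)) := by
  unfold analyze_speaker_lines
  rw [analyze_fold]
  unfold pvSortedC pvS pvDC
  rw [PySem.Dict.counter_eq_foldl]
  simp only [zero_add]

theorem analyze_keys (ds : List (List (String × String))) :
    (analyze_speaker_lines ds).keys =
      "default" :: ((pvSortedC ds).map Prod.fst).filter
        (fun x => decide (x ∉ (["default"] : List String))) := by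
  rw [analyze_eq]
  have h := PySem.Dict.keys_foldl_insert_key (pvSortedC ds) Prod.fst (fun _ p => p.2)
    ((PySem.Dict.empty : PySem.Dict String Int).insert "default" (pvDC ds))
  simp only [] at h
  rw [h]
  have h0 : ((PySem.Dict.empty : PySem.Dict String Int).insert "default" (pvDC ds)).keys
      = ["default"] := rfl
  rw [h0, set_update_of_nodup _ _ (sortedC_fst_nodup ds)]
  rfl

theorem analyze_getD_default (ds : List (List (String × String))) :
    (analyze_speaker_lines ds).getD "default" 0 = pvHeadA ds := by
  rw [analyze_eq]
  unfold pvHeadA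
  by_cases hdef : "default" ∈ pvS ds
  · rw [if_pos hdef]
    have hmem : ("default", (((pvS ds).count "default" : Nat) : Int)) ∈ pvSortedC ds := by
      rw [mem_sortedC, PySem.Dict.items_counter]
      exact List.mem_map.mpr ⟨"default", by rw [PySem.Set.mem_ofList]; exact hdef, rfl⟩
    exact getD_foldl_insert_of_mem _ _ _ _ hmem (sortedC_fst_nodup ds)
  · rw [if_neg hdef]
    have hnm : "default" ∉ (pvSortedC ds).map Prod.fst := by
      rw [(sortedC_fst_perm ds).mem_iff, PySem.Set.mem_ofList]
      exact hdef
    rw [getD_foldl_insert_of_not_mem _ _ _ hnm, PySem.Dict.getD_insert, if_pos rfl]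

theorem analyze_getD_mem (ds : List (List (String × String))) (k : String)
    (hk : k ∈ pvS ds) :
    (analyze_speaker_lines ds).getD k 0 = (((pvS ds).count k : Nat) : Int) := by
  rw [analyze_eq]
  have hmem : (k, (((pvS ds).count k : Nat) : Int)) ∈ pvSortedC ds := by
    rw [mem_sortedC, PySem.Dict.items_counter]
    exact List.mem_map.mpr ⟨k, by rw [PySem.Set.mem_ofList]; exact hk, rfl⟩
  exact getD_foldl_insert_of_mem _ _ _ _ hmem (sortedC_fst_nodup ds)

theorem target_mem_keys (ds : List (List (String × String))) (d : List (String × String))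
    (hd : d ∈ ds) : pvTarget d ∈ (analyze_speaker_lines ds).keys := by
  rw [analyze_keys]
  rcases h : pvSpk d with _ | s
  · have : pvTarget d = "default" := by rw [pvTarget_eq_spk, h]; rfl
    rw [this]
    exact List.mem_cons_self
  · have hts : pvTarget d = s := by rw [pvTarget_eq_spk, h]; rfl
    rw [hts]
    by_cases hs : s = "default"
    · rw [hs]; exact List.mem_cons_self
    · refine List.mem_cons_of_mem _ (List.mem_filter.mpr ⟨?_, by simpa using hs⟩)
      rw [(sortedC_fst_perm ds).mem_iff, PySem.Set.mem_ofList]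
      exact List.mem_filterMap.mpr ⟨d, hd, h⟩

theorem A_out (ds : List (List (String × String))) (_hpre : Pre_get_speaker_statistics ds) :
    get_speaker_statistics ds =
      ("default", pvHeadA ds, pvCC ds "default", pvML ds "default") :: pvTail ds := by
  unfold get_speaker_statistics
  simp only []
  set L := analyze_speaker_lines ds with hL
  set c0 := L.keys.foldl (fun d k => d.insert k (0 : Int)) PySem.Dict.empty with hc0def
  have hz : ∀ (k : String), (PySem.Dict.empty : PySem.Dict String Int).getD k 0 = 0 := by
    intro k; rfl
  have hc0 : ∀ k, c0.getD k 0 = 0 := fun k => getD_foldl_insert_zero _ _ hz k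
  have hc0keys : c0.keys = PySem.Set.update [] L.keys := by
    rw [hc0def]
    exact PySem.Dict.keys_foldl_insert _ (fun _ _ => 0) _
  have hcont : ∀ d ∈ ds, c0.contains (pvTarget d) = true := by
    intro d hd
    rw [PySem.Dict.contains_iff_mem_keys, hc0keys, PySem.Set.mem_update]
    exact Or.inr (target_mem_keys ds d hd)
  have hcf := char_fold ds c0 c0
  have hcc : ∀ k, (ds.foldl pvCharStep (c0, c0)).1.getD k 0 = pvCC ds k := by
    intro k
    rw [(hcf k hcont).1, hc0 k, zero_add]
  have hml : ∀ k, (ds.foldl pvCharStep (c0, c0)).2.getD k 0 = pvML ds k := by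
    intro k
    rw [(hcf k hcont).2, hc0 k]
    rfl
  rw [analyze_keys ds, List.map_cons]
  congr 1
  · rw [hcc, hml, hL, analyze_getD_default ds]
  · rw [tail_eq_map_keys]
    refine List.map_congr_left ?_
    intro k hkmem
    rcases List.mem_filter.mp hkmem with ⟨hk1, hk2⟩
    have hkne : k ≠ "default" := by simpa using hk2
    have hkS : k ∈ pvS ds := by
      rw [← PySem.Set.mem_ofList, ← (sortedC_fst_perm ds).mem_iff]
      exact hk1
    rw [hcc, hml, hL, analyze_getD_mem ds k hkS]
    have hcount := count_target_of_ne ds k hkne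
    simp only [pvTrip, pvS] at *
    rw [hcount]

theorem spk_default_iff (d : List (String × String))
    (hp : ((PySem.Dict.ofList d).get? "type").isSome = true) :
    ((PySem.Dict.ofList d).get? "type" = some "dialogue" ∧
        (PySem.Dict.ofList d).get? "speaker" = some "default") ↔
      pvSpk d = some "default" := by
  unfold pvSpk pvLook
  rcases ht : (PySem.Dict.ofList d).get? "type" with _ | t
  · rw [ht] at hp; simp at hp
  · rcases hs : (PySem.Dict.ofList d).get? "speaker" with _ | s
    · simp
    · simp only [Option.getD_some, Option.some.injEq]
      constructor
      · rintro ⟨h1, h2⟩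
        subst h1; subst h2
        simp
      · intro h
        split_ifs at h with hc
        simp only [Option.some.injEq] at h
        subst h
        exact ⟨by rw [hc.1], rfl⟩

theorem spk_none_iff (d : List (String × String))
    (hp : ((PySem.Dict.ofList d).get? "type").isSome = true) :
    (¬((PySem.Dict.ofList d).get? "type" = some "dialogue" ∧
        ((PySem.Dict.ofList d).get? "speaker").getD "" ≠ "")) ↔
      pvSpk d = none := by
  unfold pvSpk pvLook
  rcases ht : (PySem.Dict.ofList d).get? "type" with _ | t
  · rw [ht] at hp; simp at hp
  · rcases hs : (PySem.Dict.ofList d).get? "speaker" with _ | s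
    · simp
    · simp only [Option.getD_some, ne_eq, Option.some.injEq]
      by_cases hc : t = "dialogue" ∧ s ≠ ""
      · rw [if_pos hc]
        simp only [reduceCtorEq, iff_false, not_not]
        exact ⟨by rw [hc.1], hc.2⟩
      · rw [if_neg hc]
        simp only [iff_true]
        intro hcon
        exact hc ⟨by rw [← hcon.1], hcon.2⟩

theorem D_iff (ds : List (List (String × String))) (hpre : Pre_get_speaker_statistics ds) :
    D_get_speaker_statistics ds ↔
      "default" ∈ pvS ds ∧ 0 < ds.countP (fun d => (pvSpk d).isNone) := by
  unfold D_get_speaker_statistics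
  constructor
  · rintro ⟨⟨d1, hd1, hc1⟩, ⟨d2, hd2, hc2⟩⟩
    refine ⟨List.mem_filterMap.mpr ⟨d1, hd1, (spk_default_iff d1 (hpre d1 hd1)).mp hc1⟩, ?_⟩
    rw [List.countP_pos_iff]
    exact ⟨d2, hd2, by simp [(spk_none_iff d2 (hpre d2 hd2)).mp hc2]⟩
  · rintro ⟨h1, h2⟩
    rcases List.mem_filterMap.mp h1 with ⟨d1, hd1, hs1⟩
    rcases List.countP_pos_iff.mp h2 with ⟨d2, hd2, hs2⟩
    simp only [Option.isNone_iff_eq_none] at hs2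
    exact ⟨⟨d1, hd1, (spk_default_iff d1 (hpre d1 hd1)).mpr hs1⟩,
           ⟨d2, hd2, (spk_none_iff d2 (hpre d2 hd2)).mpr hs2⟩⟩

-- ===== VERDICT (by name: the statement is the Claim_ definition above) =====
theorem get_speaker_statistics_spec : Claim_unchanged_get_speaker_statistics := by
  intro ds _ hpre hnd

  rw [A_out ds hpre, B_out ds]
  rw [D_iff ds hpre] at hnd
  have hcnt := count_target_default ds
  have hhead : pvHeadA ds = (pvTrip ds "default").1 := by
    unfold pvHeadA pvTrip pvDC at *
    by_cases hdef : "default" ∈ pvS ds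
    · have hz : ds.countP (fun d => (pvSpk d).isNone) = 0 := by
        by_contra hz
        exact hnd ⟨hdef, Nat.pos_of_ne_zero hz⟩
      rw [if_pos hdef]
      simp only [pvS] at *
      omega
    · rw [if_neg hdef]
      have : (pvS ds).count "default" = 0 := List.count_eq_zero.mpr hdef
      simp only [pvS] at *
      omega
  rw [hhead]
  simp [pvTrip]

theorem get_speaker_statistics_changed : Claim_changed_get_speaker_statistics := by
  unfold Claim_changed_get_speaker_statistics; decide

theorem get_speaker_statistics_tight : Claim_exact_get_speaker_statistics := by
  intro ds _ hpre hd
  rw [A_out ds hpre, B_out ds, D_iff ds hpre] at *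
  intro heq
  have h1 := (List.cons.injEq _ _ _ _).mp heq
  have h2 := (Prod.ext_iff.mp h1.1).2
  have h3 := (Prod.ext_iff.mp h2).1
  have hcnt := count_target_default ds
  rcases hd with ⟨hdef, hpos⟩
  simp only [pvHeadA, pvTrip, pvDC, if_pos hdef] at h3 hcnt
  simp only [pvS] at *
  omega
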